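-- pv_equiv track=rewrite | github.com/yxun/notebook | python/leetcode/544_output_contest_matches.py | findContestMatch
-- ===== SOURCE A (Python) =====
-- def findContestMatch(n):
--     """
--     :type n: int
--     :rtype: str
--     """
--     def helper(array):
--         if len(array) == 1: return array[0]
--
--         res = []
--         m = len(array)
--         for i in range(m//2):
--             res.append('('+array[i]+','+array[m-1-i]+')')
--         return helper(res)
--
--     a = list(map(str, range(1, n+1)))
--     return helper(a)
-- ===== SOURCE B (Python) =====
-- def findContestMatch(n):
--     """
--     :type n: int
--     :rtype: str
--     """
--     # Build the bracket as a binary tree of tuples first, render strings once at the end.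
--     nodes = list(range(1, n + 1))
--     while len(nodes) > 1:
--         nodes = [(x, y) for x, y in zip(nodes[:len(nodes) // 2], reversed(nodes))]
--
--     def render(t):
--         if isinstance(t, int):
--             return str(t)
--         return '(' + render(t[0]) + ',' + render(t[1]) + ')'
--
--     return render(nodes[0])
-- ===== Notes on version B (the rewrite author's own statement) =====
-- stated objective: alternative
-- what changed: B builds the bracket as a binary tree of int leaves via an iterative zip-with-reversed pairing loop and renders the string in one final recursive pass, instead of A's recursive helper that concatenates strings at every round.
import Mathlib
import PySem

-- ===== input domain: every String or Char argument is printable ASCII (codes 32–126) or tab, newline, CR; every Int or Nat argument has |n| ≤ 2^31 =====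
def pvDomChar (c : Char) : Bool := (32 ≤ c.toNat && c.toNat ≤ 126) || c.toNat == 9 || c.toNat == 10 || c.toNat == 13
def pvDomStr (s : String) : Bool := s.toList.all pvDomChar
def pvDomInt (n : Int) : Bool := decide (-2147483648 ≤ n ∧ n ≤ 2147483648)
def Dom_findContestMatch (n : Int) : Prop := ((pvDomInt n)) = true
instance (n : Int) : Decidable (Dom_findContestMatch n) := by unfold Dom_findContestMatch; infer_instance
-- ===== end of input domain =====

-- B builds the bracket as a binary tree of pairs and renders the string once at the end,
-- instead of A's recursive helper concatenating strings every round (objective: alternative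
-- data structure, same cost).

-- ===== PORT A =====
-- one round of A's indexed for-loop: res.append('('+array[i]+','+array[m-1-i]+')') for i in range(m//2)
def roundA (a : List String) : List String :=
  (List.range (a.length / 2)).map
    (fun i => "(" ++ a.getD i "" ++ "," ++ a.getD (a.length - 1 - i) "" ++ ")")

theorem roundA_len (a : List String) : (roundA a).length = a.length / 2 := by
  simp [roundA]

-- A's recursive helper; on the empty list Python's helper recurses forever (n ≤ 0,
-- excluded by Pre_), here that case returns "" as a totality guard.
def helperA (a : List String) : String :=
  if a.length = 1 then a.headD ""
  else if a.length ≤ 1 then ""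
  else helperA (roundA a)
termination_by a.length
decreasing_by simp only [roundA_len]; omega

def findContestMatch (n : Int) : String :=
  helperA ((PySem.List.pyRange 1 (n + 1) 1).map PySem.Int.toStr)

-- ===== PORT B =====
-- B's values are ints or nested pairs; ported as a binary tree.
inductive PTree where
  | leaf : Int → PTree
  | node : PTree → PTree → PTree
deriving DecidableEq, Repr

-- one round of B: [(x, y) for x, y in zip(nodes[:len(nodes)//2], reversed(nodes))]
def roundT (a : List PTree) : List PTree :=
  ((a.take (a.length / 2)).zip a.reverse).map (fun p => PTree.node p.1 p.2)

theorem roundT_len (a : List PTree) : (roundT a).length = a.length / 2 := by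
  simp [roundT]; omega

-- B's while-loop; nodes[0] raises IndexError on the empty list (n ≤ 0, excluded by Pre_),
-- here that case yields a dummy leaf as a totality guard.
def loopT (a : List PTree) : PTree :=
  if a.length > 1 then loopT (roundT a) else a.headD (PTree.leaf 0)
termination_by a.length
decreasing_by simp only [roundT_len]; omega

-- B's render
def render : PTree → String
  | PTree.leaf k => PySem.Int.toStr k
  | PTree.node l r => "(" ++ render l ++ "," ++ render r ++ ")"

def findContestMatch_alt (n : Int) : String :=
  render (loopT ((PySem.List.pyRange 1 (n + 1) 1).map PTree.leaf))

-- ===== PRECONDITION & SPEC =====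
-- n ≤ 0 is excluded: there A hits RecursionError (helper([]) recurses forever) and B's nodes[0] raises IndexError.
def Pre_findContestMatch (n : Int) : Prop := 1 ≤ n
instance (n : Int) : Decidable (Pre_findContestMatch n) := by unfold Pre_findContestMatch; infer_instance
def pvWitness_findContestMatch : Int := (6)

def Spec_findContestMatch (n : Int) (out : String) : Prop := out = findContestMatch_alt n
instance (n : Int) (out : String) : Decidable (Spec_findContestMatch n out) := by unfold Spec_findContestMatch; infer_instance

-- ===== CLAIM (what is proved, stated in full; the proofs are below) =====
def Claim_equal_findContestMatch : Prop := ∀ (n : Int), Dom_findContestMatch n → Pre_findContestMatch n → Spec_findContestMatch n (findContestMatch n)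

-- ===== LEMMAS AND PROOFS =====
-- rendering B's round gives exactly A's string round
theorem round_render (a : List PTree) : roundA (a.map render) = (roundT a).map render := by
  apply List.ext_getElem
  · simp [roundA, roundT]; omega
  · intro i h1 h2
    have hi : i < a.length / 2 := by simpa [roundA] using h1
    have hia : i < a.length := by omega
    have hj : a.length - 1 - i < a.length := by omega
    simp [roundA, roundT, List.getElem_zip, List.getElem_take, List.getElem_reverse,
      List.getD_eq_getElem?_getD, hia, hj, render]

theorem helperA_render (a : List PTree) (h : a ≠ []) :
    helperA (a.map render) = render (loopT a) := by
  rw [helperA, loopT]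
  by_cases h1 : a.length = 1
  · obtain ⟨x, hx⟩ : ∃ x, a = [x] := List.length_eq_one_iff.mp h1
    simp [hx]
  · have hlen : 0 < a.length := List.length_pos_iff.mpr h
    have h2 : a.length > 1 := by omega
    rw [if_neg (by simpa using h1), if_neg (by simp; omega), if_pos h2, round_render]
    exact helperA_render (roundT a) (by
      have := roundT_len a
      intro he; rw [he] at this; simp at this; omega)
termination_by a.length
decreasing_by simp only [roundT_len]; omega

-- ===== VERDICT (by name: the statement is the Claim_ definition above) =====
theorem findContestMatch_spec : Claim_equal_findContestMatch := by
  intro n _ hn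
  have hn1 : 1 ≤ n := hn
  unfold Spec_findContestMatch findContestMatch findContestMatch_alt
  rw [← helperA_render]
  · rw [List.map_map]; rfl
  · have hlen : ((PySem.List.pyRange 1 (n + 1) 1).map PTree.leaf).length ≠ 0 := by
      simp [PySem.List.length_pyRange_one]; omega
    intro he; rw [he] at hlen; simp at hlen
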